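-- pv_equiv track=rewrite | github.com/Bjorne1/hospital-deploy | hospital_deploy_tool/log_tools.py | _expand_indexes
-- ===== SOURCE A (Python) =====
-- def _expand_indexes(indexes: list[int], total: int, context_lines: int) -> list[int]:
--     if context_lines <= 0 or not indexes:
--         return indexes
--     expanded: set[int] = set()
--     for index in indexes:
--         start = max(0, index - context_lines)
--         end = min(total - 1, index + context_lines)
--         expanded.update(range(start, end + 1))
--     return sorted(expanded)
-- ===== SOURCE B (Python) =====
-- def _expand_indexes(indexes: list[int], total: int, context_lines: int) -> list[int]:
--     if context_lines <= 0 or not indexes: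
--         return indexes
--     out = []
--     nxt = 0
--     for i in sorted(indexes):
--         lo = max(nxt, max(0, i - context_lines))
--         hi = min(total - 1, i + context_lines)
--         out.extend(range(lo, hi + 1))
--         nxt = max(nxt, hi + 1)
--     return out
-- ===== Notes on version B (the rewrite author's own statement) =====
-- stated objective: faster
-- what changed: Instead of inserting every line of every context window into a set and then sorting the whole set, B sorts the k indexes once and does a single sweep that emits each merged window segment directly (clipping at the highest line already emitted), so the output is produced already sorted and deduplicated with no per-line set work and no final sort.
import Mathlib
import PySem

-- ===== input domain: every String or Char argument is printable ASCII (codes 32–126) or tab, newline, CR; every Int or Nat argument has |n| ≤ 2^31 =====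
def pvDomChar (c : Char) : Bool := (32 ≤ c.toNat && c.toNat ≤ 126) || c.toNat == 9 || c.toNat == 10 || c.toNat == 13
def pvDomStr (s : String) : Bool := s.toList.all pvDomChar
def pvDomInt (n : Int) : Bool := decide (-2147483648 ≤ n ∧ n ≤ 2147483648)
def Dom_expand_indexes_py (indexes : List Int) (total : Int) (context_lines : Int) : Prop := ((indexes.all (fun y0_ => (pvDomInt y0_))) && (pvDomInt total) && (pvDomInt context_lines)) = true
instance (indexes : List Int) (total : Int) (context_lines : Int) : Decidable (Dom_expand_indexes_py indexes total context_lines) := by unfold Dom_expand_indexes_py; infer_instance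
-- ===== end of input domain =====

-- B replaces A's per-index set insertion + final sort by one sorted sweep that emits
-- merged context windows directly; objective: faster (no per-line set work, no final sort).


-- ===== PORT A =====
def expand_indexes_py (indexes : List Int) (total : Int) (context_lines : Int) : List Int :=
  if context_lines ≤ 0 ∨ indexes = [] then indexes
  else
    let expanded : PySem.Set Int :=
      indexes.foldl (fun s index =>
        PySem.Set.update s
          (PySem.List.pyRange (max 0 (index - context_lines))
            (min (total - 1) (index + context_lines) + 1) 1))
        PySem.Set.empty
    PySem.List.sorted expanded (fun x => x) false

-- ===== PORT B =====
def expand_indexes_py_alt (indexes : List Int) (total : Int) (context_lines : Int) : List Int :=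
  if context_lines ≤ 0 ∨ indexes = [] then indexes
  else
    ((PySem.List.sorted indexes (fun x => x) false).foldl
      (fun (st : List Int × Int) i =>
        let lo := max st.2 (max 0 (i - context_lines))
        let hi := min (total - 1) (i + context_lines)
        (st.1 ++ PySem.List.pyRange lo (hi + 1) 1, max st.2 (hi + 1)))
      ([], 0)).1

-- ===== PRECONDITION & SPEC =====
def Spec_expand_indexes_py (indexes : List Int) (total : Int) (context_lines : Int) (out : List Int) : Prop := out = expand_indexes_py_alt indexes total context_lines
instance (indexes : List Int) (total : Int) (context_lines : Int) (out : List Int) : Decidable (Spec_expand_indexes_py indexes total context_lines out) := by unfold Spec_expand_indexes_py; infer_instance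

-- ===== CLAIM (what is proved, stated in full; the proofs are below) =====
def Claim_equal_expand_indexes_py : Prop := ∀ (indexes : List Int) (total : Int) (context_lines : Int), Dom_expand_indexes_py indexes total context_lines → Spec_expand_indexes_py indexes total context_lines (expand_indexes_py indexes total context_lines)

-- ===== LEMMAS AND PROOFS =====

-- the context window of index i, clipped to the file
def pvWin (total context_lines i x : Int) : Prop :=
  max 0 (i - context_lines) ≤ x ∧ x ≤ min (total - 1) (i + context_lines)

-- membership of A's accumulated set
theorem pvA_mem (total context_lines : Int) (l : List Int) (s : PySem.Set Int) (x : Int) :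
    x ∈ l.foldl (fun s index =>
        PySem.Set.update s
          (PySem.List.pyRange (max 0 (index - context_lines))
            (min (total - 1) (index + context_lines) + 1) 1)) s ↔
      x ∈ s ∨ ∃ i ∈ l, pvWin total context_lines i x := by
  induction l generalizing s with
  | nil => simp
  | cons i t ih =>
    rw [List.foldl_cons, ih]
    simp only [PySem.Set.mem_update, PySem.List.mem_pyRange_one, List.mem_cons, pvWin]
    constructor
    · rintro ((h | h) | ⟨j, hj, hw⟩)
      · exact Or.inl h
      · exact Or.inr ⟨i, Or.inl rfl, by omega⟩
      · exact Or.inr ⟨j, Or.inr hj, hw⟩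
    · rintro (h | ⟨j, rfl | hj, hw⟩)
      · exact Or.inl (Or.inl h)
      · exact Or.inl (Or.inr (by omega))
      · exact Or.inr ⟨j, hj, hw⟩

theorem pvA_nodup (total context_lines : Int) (l : List Int) (s : PySem.Set Int)
    (hs : s.Nodup) :
    (l.foldl (fun s index =>
        PySem.Set.update s
          (PySem.List.pyRange (max 0 (index - context_lines))
            (min (total - 1) (index + context_lines) + 1) 1)) s).Nodup := by
  induction l generalizing s with
  | nil => exact hs
  | cons i t ih => exact ih _ (PySem.Set.nodup_update _ _ hs)

-- B's sweep invariant: over a ≤-sorted index list, the sweep keeps the output strictly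
-- increasing and its members are exactly the window points of the indexes processed so far.
theorem pvB_invariant (total context_lines : Int) (l : List Int) (acc : List Int) (nxt : Int)
    (hsorted : l.Pairwise (· ≤ ·))
    (h1 : acc.Pairwise (· < ·))
    (h2 : ∀ x ∈ acc, x < nxt)
    (h3 : 0 ≤ nxt)
    (h4 : ∀ i ∈ l, ∀ x, pvWin total context_lines i x → x < nxt → x ∈ acc) :
    (l.foldl (fun (st : List Int × Int) i =>
        let lo := max st.2 (max 0 (i - context_lines))
        let hi := min (total - 1) (i + context_lines)
        (st.1 ++ PySem.List.pyRange lo (hi + 1) 1, max st.2 (hi + 1))) (acc, nxt)).1.Pairwise (· < ·) ∧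
    ∀ x, x ∈ (l.foldl (fun (st : List Int × Int) i =>
        let lo := max st.2 (max 0 (i - context_lines))
        let hi := min (total - 1) (i + context_lines)
        (st.1 ++ PySem.List.pyRange lo (hi + 1) 1, max st.2 (hi + 1))) (acc, nxt)).1 ↔
      x ∈ acc ∨ ∃ i ∈ l, pvWin total context_lines i x := by
  induction l generalizing acc nxt with
  | nil => exact ⟨h1, by simp⟩
  | cons i t ih =>
    obtain ⟨hle, ht⟩ := List.pairwise_cons.mp hsorted
    simp only [List.foldl_cons]
    set lo := max nxt (max 0 (i - context_lines)) with hlo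
    set hi := min (total - 1) (i + context_lines) with hhi
    have hrange : ∀ y, y ∈ PySem.List.pyRange lo (hi + 1) 1 ↔ lo ≤ y ∧ y < hi + 1 :=
      fun y => PySem.List.mem_pyRange_one
    have h1' : (acc ++ PySem.List.pyRange lo (hi + 1) 1).Pairwise (· < ·) := by
      refine List.pairwise_append.mpr ⟨h1, PySem.List.pairwise_lt_pyRange_one _ _, ?_⟩
      intro a ha b hb
      have := h2 a ha
      have := (hrange b).mp hb
      omega
    have h2' : ∀ x ∈ acc ++ PySem.List.pyRange lo (hi + 1) 1, x < max nxt (hi + 1) := by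
      intro x hx
      rcases List.mem_append.mp hx with hx | hx
      · have := h2 x hx; omega
      · have := (hrange x).mp hx; omega
    have h4' : ∀ j ∈ t, ∀ x, pvWin total context_lines j x → x < max nxt (hi + 1) →
        x ∈ acc ++ PySem.List.pyRange lo (hi + 1) 1 := by
      intro j hj x hw hx
      have hij : i ≤ j := hle j hj
      obtain ⟨hw1, hw2⟩ := hw
      by_cases hlt : x < nxt
      · exact List.mem_append.mpr (Or.inl (h4 j (List.mem_cons_of_mem _ hj) x ⟨hw1, hw2⟩ hlt))
      · refine List.mem_append.mpr (Or.inr ((hrange x).mpr ⟨?_, ?_⟩)) <;> omega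
    obtain ⟨hp, hm⟩ := ih _ _ ht h1' h2' (by omega) h4'
    refine ⟨hp, fun x => (hm x).trans ?_⟩
    constructor
    · rintro (hx | ⟨j, hj, hw⟩)
      · rcases List.mem_append.mp hx with hx | hx
        · exact Or.inl hx
        · have := (hrange x).mp hx
          exact Or.inr ⟨i, List.mem_cons_self, by constructor <;> omega⟩
      · exact Or.inr ⟨j, List.mem_cons_of_mem _ hj, hw⟩
    · rintro (hx | ⟨j, hj, hw⟩)
      · exact Or.inl (List.mem_append.mpr (Or.inl hx))
      rcases List.mem_cons.mp hj with rfl | hj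
      ·
        obtain ⟨hw1, hw2⟩ := hw
        by_cases hge : lo ≤ x
        · exact Or.inl (List.mem_append.mpr (Or.inr ((hrange x).mpr ⟨hge, by omega⟩)))
        · have hlt : x < nxt := by omega
          exact Or.inl (List.mem_append.mpr
            (Or.inl (h4 j List.mem_cons_self x ⟨hw1, hw2⟩ hlt)))
      · exact Or.inr ⟨j, hj, hw⟩

-- ===== VERDICT (by name: the statement is the Claim_ definition above) =====
theorem expand_indexes_py_spec : Claim_equal_expand_indexes_py := by
  intro indexes total context_lines _
  unfold Spec_expand_indexes_py expand_indexes_py expand_indexes_py_alt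
  by_cases hguard : context_lines ≤ 0 ∨ indexes = []
  · simp [hguard]
  · simp only [hguard, if_false]
    have hsorted : (PySem.List.sorted indexes (fun x => x) false).Pairwise (· ≤ ·) := by
      simpa using PySem.List.sorted_pairwise (xs := indexes) (key := fun x => x)
    obtain ⟨hpair, hmem⟩ := pvB_invariant total context_lines
      (PySem.List.sorted indexes (fun x => x) false) [] 0 hsorted
      (by simp) (by simp) le_rfl
      (by intro i _ x hw hx; exact absurd hx (by obtain ⟨h1, _⟩ := hw; omega))
    refine PySem.List.sorted_eq_of_perm_of_pairwise_lt _ _ (fun x => x) ?_ hpair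
    refine (List.perm_ext_iff_of_nodup (hpair.imp ne_of_lt) (pvA_nodup _ _ _ _ (by simp [PySem.Set.empty]))).mpr ?_
    intro x
    rw [hmem x, pvA_mem]
    simp [PySem.List.mem_sorted]
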